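-- pv_equiv track=rewrite | github.com/anmorgunov/core_public | Analysis/Modules/Parser.py | get_next_col
-- ===== SOURCE A (Python) =====
-- from typing import Dict, List, Optional, Set, Union
--
-- def get_next_col(col: str, prefix: Optional[str] = None) -> str:
--     if prefix is None:
--         prefix = ""
--     strings = "ABCDEFGHIJKLMNOPQRSTUVWXYZ"
--     if not col:
--         return "A"
--     if len(col) == 1:
--         if col == "Z":
--             return get_next_col(prefix, prefix=None) + get_next_col("", prefix=None)
--         else:
--             return prefix + strings[strings.index(col) + 1]
--     else:
--         return get_next_col(col[1:], prefix=prefix + col[0])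
-- ===== SOURCE B (Python) =====
-- def get_next_col(col, prefix=None):
--     if prefix is None:
--         prefix = ""
--     if not col:
--         return "A"
--     strings = "ABCDEFGHIJKLMNOPQRSTUVWXYZ"
--     s = prefix + col
--     k = 0
--     while k < len(s) and s[len(s) - 1 - k] == "Z":
--         k += 1
--     if k == len(s):
--         return "A" * (len(s) + 1)
--     head = s[: len(s) - k - 1]
--     bumped = strings[strings.index(s[len(s) - k - 1]) + 1]
--     return head + bumped + "A" * k
-- ===== Notes on version B (the rewrite author's own statement) =====
-- stated objective: simpler
-- what changed: A increments the label by recursing character-by-character (shifting col into prefix and recursing on prefix at a carry); B builds s = prefix + col once, counts the trailing 'Z' run with a single scan from the right, and returns head + bumped-char + 'A'*k (or all-'A' when the carry runs off the left end).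
import Mathlib
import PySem

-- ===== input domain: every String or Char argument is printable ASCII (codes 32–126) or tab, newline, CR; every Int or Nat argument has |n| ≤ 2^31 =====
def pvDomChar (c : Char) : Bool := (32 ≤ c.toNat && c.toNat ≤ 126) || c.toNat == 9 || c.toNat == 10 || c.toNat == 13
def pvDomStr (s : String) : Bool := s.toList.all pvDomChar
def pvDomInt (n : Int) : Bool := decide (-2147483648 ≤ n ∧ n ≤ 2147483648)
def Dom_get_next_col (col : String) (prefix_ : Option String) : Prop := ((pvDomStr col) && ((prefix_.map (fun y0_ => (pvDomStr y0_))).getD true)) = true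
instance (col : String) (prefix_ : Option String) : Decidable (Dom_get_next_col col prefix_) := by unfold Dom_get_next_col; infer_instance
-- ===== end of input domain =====

-- B replaces A's char-by-char recursion by a single trailing-'Z' count on prefix+col (objective: simpler).


-- shared helper: strings[strings.index(c) + 1], the expression both Pythons use on the bumped
-- character ('?' stands in for the ValueError case, which Pre_ excludes)
def pvStrings : List Char := "ABCDEFGHIJKLMNOPQRSTUVWXYZ".toList

def pvNextChar (c : Char) : Char := pvStrings.getD (pvStrings.idxOf c + 1) '?'

-- ===== PORT A =====
-- literal transliteration of A's recursion; state = (col, prefix) as lists of chars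
def goA : List Char → List Char → List Char
  | [], _p => ['A']
  | [c], p => if c = 'Z' then goA p [] ++ goA [] [] else p ++ [pvNextChar c]
  | c :: c' :: rest, p => goA (c' :: rest) (p ++ [c])
termination_by col p => (col.length + p.length, col.length)
decreasing_by all_goals (simp [Prod.lex_iff]; try omega)

def get_next_col (col : String) (prefix_ : Option String) : String :=
  String.ofList (goA col.toList (prefix_.getD "").toList)

-- ===== PORT B =====
-- transliteration of Source B: count k trailing 'Z's of s = prefix + col, then bump char s[len-k-1]
def bumpB (s : List Char) : List Char :=
  let k := (s.reverse.takeWhile (fun c => c == 'Z')).length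
  if k = s.length then List.replicate (s.length + 1) 'A'
  else s.take (s.length - k - 1) ++ [pvNextChar (s.getD (s.length - k - 1) ' ')] ++ List.replicate k 'A'

def get_next_col_alt (col : String) (prefix_ : Option String) : String :=
  if col = "" then "A"
  else String.ofList (bumpB ((prefix_.getD "").toList ++ col.toList))

-- ===== PRECONDITION & SPEC =====
-- A raises ValueError exactly when the carry stops on a character outside 'A'..'Y'
-- (the first non-'Z' character from the right of prefix+col); Pre_ excludes those inputs.
def Pre_get_next_col (col : String) (prefix_ : Option String) : Prop :=
  col = "" ∨
    (let t := (((prefix_.getD "").toList ++ col.toList).reverse).dropWhile (fun c => c == 'Z')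
     t = [] ∨ ('A' ≤ t.headD 'A' ∧ t.headD 'A' ≤ 'Y'))
instance (col : String) (prefix_ : Option String) : Decidable (Pre_get_next_col col prefix_) := by
  unfold Pre_get_next_col; infer_instance

def pvWitness_get_next_col : String × Option String := ("BZ", some "A")

def Spec_get_next_col (col : String) (prefix_ : Option String) (out : String) : Prop := out = get_next_col_alt col prefix_
instance (col : String) (prefix_ : Option String) (out : String) : Decidable (Spec_get_next_col col prefix_ out) := by unfold Spec_get_next_col; infer_instance

-- ===== CLAIM (what is proved, stated in full; the proofs are below) =====
def Claim_equal_get_next_col : Prop := ∀ (col : String) (prefix_ : Option String), Dom_get_next_col col prefix_ → Pre_get_next_col col prefix_ → Spec_get_next_col col prefix_ (get_next_col col prefix_)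

-- ===== LEMMAS AND PROOFS =====

lemma bumpB_nil : bumpB [] = ['A'] := by decide

lemma trailZ_le (s : List Char) : (s.reverse.takeWhile (fun c => c == 'Z')).length ≤ s.length := by
  simpa using (List.takeWhile_sublist (l := s.reverse) (fun c => c == 'Z')).length_le

lemma bumpB_append_Z (s : List Char) : bumpB (s ++ ['Z']) = bumpB s ++ ['A'] := by
  unfold bumpB
  have h1 : (s ++ ['Z']).reverse.takeWhile (fun c => c == 'Z')
      = 'Z' :: s.reverse.takeWhile (fun c => c == 'Z') := by
    simp
  rw [h1]
  simp only [List.length_cons, List.length_append, List.length_cons, List.length_nil,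
    Nat.zero_add]
  have hle := trailZ_le s
  by_cases hcase : (s.reverse.takeWhile (fun c => c == 'Z')).length = s.length
  · rw [if_pos (by omega), if_pos hcase,
      show s.length + 1 + 1 = (s.length + 1) + 1 from rfl, List.replicate_succ']
  · rw [if_neg (by omega), if_neg hcase]
    have hj : s.length + 1 - ((s.reverse.takeWhile (fun c => c == 'Z')).length + 1) - 1
        = s.length - (s.reverse.takeWhile (fun c => c == 'Z')).length - 1 := by omega
    rw [hj, List.take_append_of_le_length (by omega),
      List.getD_append _ _ _ _ (by omega), List.replicate_succ']
    simp

lemma bumpB_append_nonZ (s : List Char) (c : Char) (hc : c ≠ 'Z') :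
    bumpB (s ++ [c]) = s ++ [pvNextChar c] := by
  unfold bumpB
  have h1 : (s ++ [c]).reverse.takeWhile (fun c => c == 'Z') = [] := by
    simp [hc]
  rw [h1]
  simp only [List.length_nil, List.length_append, List.length_cons]
  rw [if_neg (by omega)]
  have hj : s.length + 1 - 0 - 1 = s.length := by omega
  rw [hj, List.take_append_of_le_length (Nat.le_refl _), List.take_length,
    List.getD_append_right _ _ _ _ (Nat.le_refl _)]
  simp

lemma goA_eq_bumpB : ∀ (col p : List Char), col ≠ [] → goA col p = bumpB (p ++ col) := by
  intro col p
  induction col, p using goA.induct with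
  | case1 p => intro h; exact absurd rfl h
  | case2 p ih1 _ih2 =>
    intro _
    rw [show goA ['Z'] p = goA p [] ++ ['A'] from by simp [goA], bumpB_append_Z]
    rcases List.eq_nil_or_concat p with hp | ⟨q, d, rfl⟩
    · subst hp; rw [show goA [] [] = ['A'] from by simp [goA], bumpB_nil]
    · rw [ih1 (by simp)]; simp
  | case3 c p hc =>
    intro _
    rw [show goA [c] p = p ++ [pvNextChar c] from by simp [goA, hc],
      bumpB_append_nonZ _ _ hc]
  | case4 c c' rest p ih =>
    intro _
    rw [show goA (c :: c' :: rest) p = goA (c' :: rest) (p ++ [c]) from by simp [goA],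
      ih (by simp)]
    simp

-- ===== VERDICT (by name: the statement is the Claim_ definition above) =====
theorem get_next_col_spec : Claim_equal_get_next_col := by
  intro col prefix_ _ _
  unfold Spec_get_next_col get_next_col get_next_col_alt
  by_cases h : col = ""
  · subst h
    rw [if_pos rfl, show ("" : String).toList = [] from rfl,
      show goA [] (prefix_.getD "").toList = ['A'] from by simp [goA]]
  · rw [if_neg h, goA_eq_bumpB _ _ (by simp [h])]
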